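-- pv_equiv track=rewrite | github.com/chetanpangam/practice | StringVowels.py | getStrings
-- ===== SOURCE A (Python) =====
-- def getStrings(word):
--     vowels = 'aeiou'
--     strings = []
--     i = 0
--     while i < len(word):
--         if word[i] not in vowels:
--             i +=1
--             continue
--         else:
--             j = i
--             while j < len(word) and word[j] in vowels:
--                 j += 1
--
--             if j-i >= 5:
--                 strings.append(word[i:j])
--
--             i = j
--
--     return strings
-- ===== SOURCE B (Python) =====
-- def getStrings(word):
--     # Mask every non-vowel to a space, then split on whitespace: the pieces are
--     # exactly the maximal vowel runs; keep those of length >= 5.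
--     masked = ''.join(c if c in 'aeiou' else ' ' for c in word)
--     return [run for run in masked.split() if len(run) >= 5]
-- ===== Notes on version B (the rewrite author's own statement) =====
-- stated objective: simpler
-- what changed: Replaces the index-based outer/inner while-loop scan with masking every non-vowel to a space and using str.split() to obtain the maximal vowel runs, then a comprehension keeps runs of length >= 5.
import Mathlib
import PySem

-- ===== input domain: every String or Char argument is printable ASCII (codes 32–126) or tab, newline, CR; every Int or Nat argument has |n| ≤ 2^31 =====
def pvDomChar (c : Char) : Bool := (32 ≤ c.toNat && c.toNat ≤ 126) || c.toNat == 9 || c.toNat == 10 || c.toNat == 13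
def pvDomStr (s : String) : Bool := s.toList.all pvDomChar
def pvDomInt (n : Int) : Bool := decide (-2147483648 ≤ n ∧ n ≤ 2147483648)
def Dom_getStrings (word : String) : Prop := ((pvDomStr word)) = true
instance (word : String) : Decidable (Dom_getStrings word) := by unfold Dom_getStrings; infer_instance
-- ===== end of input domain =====

-- B masks every non-vowel to a space and uses split(); same result, a simpler one-liner.

-- the literal 'aeiou' membership test both Python versions contain (c in 'aeiou')
def vowelChar (c : Char) : Bool := (['a', 'e', 'i', 'o', 'u'] : List Char).contains c

-- ===== PORT A =====
-- inner 'while j < len(word) and word[j] in vowels: j += 1'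
def getStringsScan (l : List Char) (j : Nat) : Nat :=
  if h : j < l.length then
    if vowelChar l[j] then getStringsScan l (j + 1) else j
  else j
termination_by l.length - j
decreasing_by omega

theorem getStringsScan_ge (l : List Char) (j : Nat) : j ≤ getStringsScan l j := by
  fun_induction getStringsScan l j with
  | case1 j h hv ih => omega
  | case2 j h hv => omega
  | case3 j h => omega

-- outer 'while i < len(word)' loop, carrying the accumulator 'strings'
def getStringsLoop (l : List Char) (strings : List String) (i : Nat) : List String :=
  if hi : i < l.length then
    if hnv : ¬ vowelChar l[i] then getStringsLoop l strings (i + 1)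
    else
      have hj : i + 1 ≤ getStringsScan l i := by
        unfold getStringsScan
        rw [dif_pos hi, if_pos (by simpa using hnv)]
        exact getStringsScan_ge l (i + 1)
      getStringsLoop l
        (if getStringsScan l i - i ≥ 5 then
            strings ++ [String.ofList (PySem.List.slice l (some (i : Int))
              (some ((getStringsScan l i : Nat) : Int)))]
          else strings)
        (getStringsScan l i)
  else strings
termination_by l.length - i
decreasing_by all_goals omega

def getStrings (word : String) : List String :=
  getStringsLoop word.toList [] 0

-- ===== PORT B =====
def getStrings_alt (word : String) : List String :=
  let masked := String.ofList (word.toList.map (fun c => if vowelChar c then c else ' '))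
  (PySem.Str.split₀ masked).filter (fun run => 5 ≤ PySem.Str.len run)

-- ===== PRECONDITION & SPEC =====
def Spec_getStrings (word : String) (out : List String) : Prop := out = getStrings_alt word
instance (word : String) (out : List String) : Decidable (Spec_getStrings word out) := by unfold Spec_getStrings; infer_instance

-- ===== CLAIM (what is proved, stated in full; the proofs are below) =====
def Claim_equal_getStrings : Prop := ∀ (word : String), Dom_getStrings word → Spec_getStrings word (getStrings word)

-- ===== LEMMAS AND PROOFS =====

-- reference shape both ports reduce to: the maximal vowel runs of a character list
def vowelRuns : List Char → List (List Char)
  | [] => []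
  | c :: cs =>
    if vowelChar c then (c :: cs.takeWhile vowelChar) :: vowelRuns (cs.dropWhile vowelChar)
    else vowelRuns cs
termination_by l => l.length
decreasing_by
  all_goals simp only [List.length_cons]
  · have := cs.length_dropWhile_le vowelChar; omega
  · omega

theorem take_takeWhile_length {α : Type} (p : α → Bool) (l : List α) :
    l.take (l.takeWhile p).length = l.takeWhile p := by
  induction l with
  | nil => rfl
  | cons c cs ih =>
    by_cases h : p c <;> simp [h, ih]

theorem drop_takeWhile_length {α : Type} (p : α → Bool) (l : List α) :
    l.drop (l.takeWhile p).length = l.dropWhile p := by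
  induction l with
  | nil => rfl
  | cons c cs ih =>
    by_cases h : p c <;> simp [h, ih]

theorem getStringsScan_spec (l : List Char) (j : Nat) :
    getStringsScan l j = j + ((l.drop j).takeWhile vowelChar).length := by
  fun_induction getStringsScan l j with
  | case1 j h hv ih =>
    rw [ih, List.drop_eq_getElem_cons h, List.takeWhile_cons, if_pos hv]
    simp; omega
  | case2 j h hv =>
    rw [List.drop_eq_getElem_cons h, List.takeWhile_cons, if_neg hv]
    rfl
  | case3 j h =>
    rw [List.drop_eq_nil_of_le (by omega)]; rfl

theorem vowelChar_not_space (c : Char) (h : vowelChar c = true) :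
    PySem.Chars.isspace c = false := by
  simp only [vowelChar, List.contains_eq_mem, decide_eq_true_eq, List.mem_cons,
    List.not_mem_nil, or_false] at h
  rcases h with h | h | h | h | h <;> subst h <;> decide

theorem getStringsLoop_spec (l : List Char) (strings : List String) (i : Nat) :
    getStringsLoop l strings i =
      strings ++ ((vowelRuns (l.drop i)).filter (fun r => 5 ≤ r.length)).map String.ofList := by
  fun_induction getStringsLoop l strings i with
  | case1 strings i hi hnv ih =>
    rw [ih, List.drop_eq_getElem_cons hi]
    rw [show vowelRuns (l[i] :: l.drop (i + 1)) = vowelRuns (l.drop (i + 1)) by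
      rw [vowelRuns]; simp [hnv]]
  | case2 strings i hi hv hj ih =>
    simp only [dite_eq_ite] at ih
    rw [ih]
    rw [not_not] at hv
    rw [List.drop_eq_getElem_cons hi,
      show vowelRuns (l[i] :: l.drop (i + 1)) =
        (l[i] :: (l.drop (i + 1)).takeWhile vowelChar) ::
          vowelRuns ((l.drop (i + 1)).dropWhile vowelChar) by rw [vowelRuns]; simp [hv]]
    set t := ((l.drop (i + 1)).takeWhile vowelChar).length with ht
    have hscan : getStringsScan l i = i + 1 + t := by
      rw [getStringsScan_spec, List.drop_eq_getElem_cons hi, List.takeWhile_cons, if_pos hv]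
      simp [ht]; omega
    have hslice : PySem.List.slice l (some (i : Int)) (some ((getStringsScan l i : Nat) : Int)) =
        l[i] :: (l.drop (i + 1)).takeWhile vowelChar := by
      rw [PySem.List.slice_natCast, hscan, List.drop_eq_getElem_cons hi]
      have h1 : i + 1 + t - i = t + 1 := by omega
      rw [h1, List.take_succ_cons]
      congr 1
      exact take_takeWhile_length vowelChar (l.drop (i + 1))
    have hdrop : l.drop (getStringsScan l i) = (l.drop (i + 1)).dropWhile vowelChar := by
      rw [← drop_takeWhile_length vowelChar (l.drop (i + 1)), List.drop_drop, hscan]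
    rw [hdrop, hslice, List.filter_cons]
    have hlen : (decide (5 ≤ (l[i] :: (l.drop (i + 1)).takeWhile vowelChar).length) = true)
        ↔ (getStringsScan l i - i ≥ 5) := by
      simp only [List.length_cons, decide_eq_true_eq, ← ht, hscan, ge_iff_le]
      omega
    by_cases h5 : getStringsScan l i - i ≥ 5
    · rw [if_pos h5, if_pos (hlen.mpr h5)]
      simp
    · rw [if_neg h5, if_neg (fun hc => h5 (hlen.mp hc))]
  | case3 strings i hi =>
    rw [List.drop_eq_nil_of_le (by omega), vowelRuns]
    simp

-- B side: split() of the masked list yields exactly the maximal vowel runs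
theorem split₀_go_masked (cs cur : List Char) (acc : List (List Char)) :
    PySem.Chars.split₀.go (cs.map (fun c => if vowelChar c then c else ' ')) cur acc =
      acc.reverse ++
        (if cur.isEmpty then vowelRuns cs
         else (cur.reverse ++ cs.takeWhile vowelChar) :: vowelRuns (cs.dropWhile vowelChar)) := by
  induction cs generalizing cur acc with
  | nil =>
    by_cases h : cur.isEmpty <;>
      simp_all [PySem.Chars.split₀.go, vowelRuns]
  | cons c rest ih =>
    by_cases hv : vowelChar c
    · have hns := vowelChar_not_space c hv
      rw [List.map_cons, if_pos hv, PySem.Chars.split₀.go, if_neg (by simp [hns]), ih]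
      rw [List.takeWhile_cons, List.dropWhile_cons]
      by_cases hc : cur.isEmpty
      · have : cur = [] := by simpa [List.isEmpty_iff] using hc
        subst this
        simp [vowelRuns, hv]
      · simp [hc, hv]
    · rw [List.map_cons, if_neg hv, PySem.Chars.split₀.go,
        if_pos (by decide), List.takeWhile_cons, List.dropWhile_cons]
      by_cases hc : cur.isEmpty
      · rw [if_pos hc, ih]
        simp [hc, vowelRuns, hv]
      · rw [if_neg hc, ih]
        by_cases h0 : rest = [] <;> simp [hc, hv, vowelRuns]

theorem split₀_masked (cs : List Char) :
    PySem.Chars.split₀ (cs.map (fun c => if vowelChar c then c else ' ')) = vowelRuns cs := by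
  rw [PySem.Chars.split₀, split₀_go_masked]
  simp

-- ===== VERDICT (by name: the statement is the Claim_ definition above) =====
theorem getStrings_spec : Claim_equal_getStrings := by
  intro word _
  unfold Spec_getStrings getStrings getStrings_alt
  rw [getStringsLoop_spec, List.drop_zero]
  show _ = ((PySem.Chars.split₀ _).map String.ofList).filter _
  rw [String.toList_ofList, split₀_masked, List.nil_append, List.filter_map]
  congr 1
  apply List.filter_congr
  intro r _
  simp [Function.comp, PySem.Str.len]
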